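-- pv_equiv track=rewrite | github.com/orsmith15/CS-122-Algorithms-in-Genomics | Final 2b/Final2b.py | hashGenome
-- ===== SOURCE A (Python) =====
-- window_ = 12
--
-- def hashGenome(genome,window = window_):
--     hashDict = {}
--     for i in range(len(genome)-window+1):
--         kmer = genome[i:i+window]
--         if kmer in hashDict:
--             hashDict[kmer] += [i]
--         else:
--             hashDict[kmer] = [i]
--     return hashDict
-- ===== SOURCE B (Python) =====
-- window_ = 12
--
-- def hashGenome(genome, window=window_):
--     kmers = [genome[i:i+window] for i in range(len(genome)-window+1)]
--     return {k: [i for i, x in enumerate(kmers) if x == k]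
--             for k in dict.fromkeys(kmers)}
-- ===== Notes on version B (the rewrite author's own statement) =====
-- stated objective: alternative
-- what changed: A groups in one pass by mutating a dict of lists with a membership branch; B never accumulates into a dict: it lists the k-mers, dedups them to get the key order, and builds each key's position list by an independent filter scan of the enumerated k-mer list (grouping by repeated selection).
import Mathlib
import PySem

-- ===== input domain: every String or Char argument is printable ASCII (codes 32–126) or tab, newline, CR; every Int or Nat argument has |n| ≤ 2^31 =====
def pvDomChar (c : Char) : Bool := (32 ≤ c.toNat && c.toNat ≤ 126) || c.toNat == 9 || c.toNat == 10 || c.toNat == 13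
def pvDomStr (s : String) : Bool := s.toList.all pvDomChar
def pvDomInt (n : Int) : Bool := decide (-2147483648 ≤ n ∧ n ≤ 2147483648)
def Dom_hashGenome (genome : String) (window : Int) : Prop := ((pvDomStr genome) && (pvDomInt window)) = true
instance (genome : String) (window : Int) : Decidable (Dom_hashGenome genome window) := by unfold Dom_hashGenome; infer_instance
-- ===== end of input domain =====

-- B drops A's dict accumulation entirely: it dedups the k-mer list for the key order and builds
-- each key's position list by an independent filter scan (objective: alternative, same results).

-- ===== PORT A =====
def hashGenome (genome : String) (window : Int) : List (String × List Int) :=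
  ((PySem.List.pyRange 0 (PySem.Str.len genome - window + 1) 1).foldl
    (fun d i =>
      let kmer := PySem.Str.slice genome (some i) (some (i + window))
      if d.contains kmer then d.insert kmer (d.getD kmer [] ++ [i])
      else d.insert kmer [i])
    PySem.Dict.empty).items

-- ===== PORT B =====
def hashGenome_alt (genome : String) (window : Int) : List (String × List Int) :=
  let kmers := (PySem.List.pyRange 0 (PySem.Str.len genome - window + 1) 1).map
      (fun i => PySem.Str.slice genome (some i) (some (i + window)))
  (PySem.List.dedup kmers).map (fun k =>
    (k, ((PySem.List.enumerate kmers).filter (fun p => p.2 == k)).map (fun p => p.1)))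

-- ===== PRECONDITION & SPEC =====
def Spec_hashGenome (genome : String) (window : Int) (out : List (String × List Int)) : Prop := out = hashGenome_alt genome window
instance (genome : String) (window : Int) (out : List (String × List Int)) : Decidable (Spec_hashGenome genome window out) := by unfold Spec_hashGenome; infer_instance

-- ===== CLAIM =====
def Claim_equal_hashGenome : Prop := ∀ (genome : String) (window : Int), Dom_hashGenome genome window → Spec_hashGenome genome window (hashGenome genome window)

-- ===== LEMMAS AND PROOFS =====

-- A's loop step equals a 'modify with default []' step.
lemma stepA_eq_modify (d : PySem.Dict String (List Int)) (k : String) (i : Int) :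
    (if d.contains k then d.insert k (d.getD k [] ++ [i]) else d.insert k [i])
      = d.modify k [] (· ++ [i]) := by
  by_cases h : d.contains k = true
  · simp [h, PySem.Dict.modify]
  · have h' : d.contains k = false := by simpa using h
    simp [h', PySem.Dict.modify, PySem.Dict.getD_of_not_contains d ([] : List Int) h']

-- range over the length of a nonnegative range is that range again
lemma pyRange_len (m : Int) :
    PySem.List.pyRange 0 (((PySem.List.pyRange 0 m 1).length : Nat) : Int) 1
      = PySem.List.pyRange 0 m 1 := by
  rw [PySem.List.pyRange_one, PySem.List.pyRange_one]
  simp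
  congr 2
  omega

-- generic grouping fact, with the k-mer map abstracted as 'key'
lemma groupA_eq (key : Int → String) (m : Int) :
    ((PySem.List.pyRange 0 m 1).foldl
      (fun d i =>
        if d.contains (key i) then d.insert (key i) (d.getD (key i) [] ++ [i])
        else d.insert (key i) [i])
      PySem.Dict.empty).items
    = (let kmers := (PySem.List.pyRange 0 m 1).map key
       (PySem.List.dedup kmers).map (fun k =>
         (k, ((PySem.List.enumerate kmers).filter (fun p => p.2 == k)).map (fun p => p.1)))) := by
  set idxs := PySem.List.pyRange 0 m 1 with hidxs
  set kmers := idxs.map key with hkmers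
  set pairs := idxs.map (fun i => (key i, i)) with hpairs
  -- enumerate of the k-mer list is the (index, kmer) pair list
  have henum : PySem.List.enumerate kmers = idxs.map (fun j => (j, key j)) := by
    rw [PySem.List.enumerate_eq_map_pyRange kmers ""]
    have hlen : PySem.List.pyRange 0 (PySem.List.len kmers) 1 = idxs := by
      simp only [PySem.List.len, hkmers, List.length_map]
      exact pyRange_len m
    rw [hlen]
    apply List.map_congr_left
    intro j hj
    have hj' := (PySem.List.mem_pyRange_one).mp (hidxs ▸ hj)
    rw [hkmers, PySem.List.pyGetD_map_pyRange_of_nonneg key m j "" hj'.1 hj'.2]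
  -- A's loop is a modify-loop over the pair list
  have h1 : idxs.foldl
      (fun d i =>
        if d.contains (key i) then d.insert (key i) (d.getD (key i) [] ++ [i])
        else d.insert (key i) [i]) PySem.Dict.empty
      = pairs.foldl (fun d p => d.modify p.1 [] (fun v => v ++ [p.2])) PySem.Dict.empty := by
    rw [hpairs, List.foldl_map]
    simp only [stepA_eq_modify]
  -- keys of the accumulated dict are the dedup'd kmers, in first-occurrence order
  have hkeysA : (pairs.foldl (fun d p => d.modify p.1 [] (fun v => v ++ [p.2]))
      PySem.Dict.empty).keys = PySem.List.dedup kmers := by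
    rw [PySem.Dict.keys_foldl_modify_key pairs Prod.fst ([] : List Int)
      (fun _ p => (fun v => v ++ [p.2])) PySem.Dict.empty]
    have : pairs.map Prod.fst = kmers := by
      simp [hpairs, hkmers, List.map_map, Function.comp_def]
    rw [this]
    rfl
  have hnodupA : (pairs.foldl (fun d p => d.modify p.1 [] (fun v => v ++ [p.2]))
      PySem.Dict.empty).keys.Nodup :=
    PySem.Dict.nodup_keys_foldl_modify_key pairs Prod.fst ([] : List Int)
      (fun _ p => (fun v => v ++ [p.2])) PySem.Dict.empty (by simp [PySem.Dict.empty])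
  simp only []
  rw [h1, PySem.Dict.items_eq_map_keys _ hnodupA ([] : List Int), hkeysA]
  apply List.map_congr_left
  intro k _
  rw [PySem.Dict.getD_foldl_modify_append]
  have hdflt : (PySem.Dict.empty : PySem.Dict String (List Int)).getD k [] = [] := rfl
  rw [hdflt, List.nil_append]
  -- both filtered/mapped position lists coincide
  rw [henum, hpairs, List.filter_map, List.filter_map, List.map_map, List.map_map]
  rfl

-- ===== VERDICT =====
theorem hashGenome_spec : Claim_equal_hashGenome := by
  intro genome window _
  show hashGenome genome window = hashGenome_alt genome window
  unfold hashGenome hashGenome_alt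
  exact groupA_eq (fun i => PySem.Str.slice genome (some i) (some (i + window))) _
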